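-- pv_equiv track=rewrite | github.com/leah-1ee/coding-test-study | 프로그래머스/1/135808. 과일 장수/과일 장수.py | solution
-- ===== SOURCE A (Python) =====
-- def solution(k, m, score):
--
--     # 점수 내림차순 정렬
--     score = sorted(score, reverse=True)
--     # 최대 가격
--     price = 0
--
--
--     for i in range(0, len(score), m):
--         # 한 상자를 만들 수 있는지
--         if (i+m) <= len(score):
--             # 상자 구성
--             temp = score[i:i+m]
--             # 가격 더하기
--             price += min(temp) * m
--
--
--     return price
-- ===== SOURCE B (Python) =====
-- def solution(k, m, score):
--     # Frequency histogram + run-length walk: sort only the DISTINCT values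
--     # descending; the b-th largest element (0-based) is the distinct value whose
--     # cumulative-count run contains b, and box minima sit at boundary indices
--     # m-1, 2m-1, ... . Walk the runs once with a pointer, never materialising
--     # the sorted list of all scores.
--     counts = {}
--     for v in score:
--         counts[v] = counts.get(v, 0) + 1
--     vals = sorted(counts, reverse=True)
--     total = 0
--     seen = 0
--     vi = 0
--     for b in range(m - 1, len(score), m):
--         while seen + counts[vals[vi]] <= b:
--             seen += counts[vals[vi]]
--             vi += 1
--         total += vals[vi]
--     return total * m
-- ===== Notes on version B (the rewrite author's own statement) =====
-- stated objective: alternative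
-- what changed: B never sorts or slices the full score list: it builds a value->count dictionary in one pass, sorts only the distinct values descending, and a single run-length pointer walk over the cumulative counts reads off the value at each box-boundary rank (m-1, 2m-1, ...), multiplying the accumulated sum by m once at the end.
import Mathlib
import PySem

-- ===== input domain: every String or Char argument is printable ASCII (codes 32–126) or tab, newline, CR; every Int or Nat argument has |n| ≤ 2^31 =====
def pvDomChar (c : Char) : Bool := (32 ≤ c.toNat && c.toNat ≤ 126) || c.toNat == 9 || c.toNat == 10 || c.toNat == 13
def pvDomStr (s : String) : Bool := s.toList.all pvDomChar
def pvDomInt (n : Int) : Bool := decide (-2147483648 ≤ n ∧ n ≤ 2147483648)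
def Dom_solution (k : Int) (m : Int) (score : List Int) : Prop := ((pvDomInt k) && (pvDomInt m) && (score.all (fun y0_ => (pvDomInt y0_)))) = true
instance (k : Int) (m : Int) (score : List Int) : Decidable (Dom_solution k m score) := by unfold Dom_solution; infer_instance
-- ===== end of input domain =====

-- B replaces A's sort-all-scores + per-box slice-and-min loop by a frequency dictionary:
-- only the DISTINCT values are sorted (descending) and a single run-length pointer walk
-- over their cumulative counts reads off the value at each box-boundary rank (objective: alternative).

-- ===== PORT A =====
-- min() on the slice: Python raises on an empty list, but in the taken branch the slice has
-- length m ≥ 1 whenever the loop body runs (m ≠ 0 from Pre_), so `.getD 0` is never used.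
def solution (k : Int) (m : Int) (score : List Int) : Int :=
  let s := PySem.List.sorted score (fun x => x) true
  (PySem.List.pyRange 0 (s.length : Int) m).foldl
    (fun price i =>
      if i + m ≤ (s.length : Int) then
        price + ((PySem.List.min? (PySem.List.slice s (some i) (some (i + m))) (fun x => x)).getD 0) * m
      else price) 0

-- ===== PORT B =====
-- Python's `while seen + counts[vals[vi]] <= b: …`: vals[vi] is ported with pyGetD (always in
-- range here: every boundary b is < len(score) = total count, so the walk stops before the end),
-- counts[vals[vi]] with Dict.getD (the key is always present); the `vi ≥ len(vals)` guard only
-- makes the recursion total — Python would raise IndexError there and never reaches it.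
def pvAdvance (vals : List Int) (counts : PySem.Dict Int Int) (b : Int) (seen : Int) (vi : Nat) :
    Int × Nat :=
  if h : vi < vals.length then
    if seen + counts.getD (PySem.List.pyGetD vals (vi : Int) 0) 0 ≤ b then
      pvAdvance vals counts b (seen + counts.getD (PySem.List.pyGetD vals (vi : Int) 0) 0) (vi + 1)
    else (seen, vi)
  else (seen, vi)
termination_by vals.length - vi

def solution_alt (k : Int) (m : Int) (score : List Int) : Int :=
  let counts := score.foldl (fun d v => d.insert v (d.getD v 0 + 1)) PySem.Dict.empty
  let vals := PySem.List.sorted counts.keys (fun x => x) true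
  let r := (PySem.List.pyRange (m - 1) (score.length : Int) m).foldl
    (fun (st : Int × Int × Nat) b =>
      let p := pvAdvance vals counts b st.2.1 st.2.2
      (st.1 + PySem.List.pyGetD vals (p.2 : Int) 0, p.1, p.2)) (0, 0, 0)
  r.1 * m

-- ===== PRECONDITION & SPEC =====
-- Pre_ excludes exactly m = 0, where Python's range(…, …, 0) makes A raise ValueError (B raises too).
def Pre_solution (k : Int) (m : Int) (score : List Int) : Prop := m ≠ 0
instance (k : Int) (m : Int) (score : List Int) : Decidable (Pre_solution k m score) := by unfold Pre_solution; infer_instance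
def pvWitness_solution : Int × Int × List Int := (4, 3, (2 : Int) :: [1, 2, 4, 1, 2, 1])

def Spec_solution (k : Int) (m : Int) (score : List Int) (out : Int) : Prop := out = solution_alt k m score
instance (k : Int) (m : Int) (score : List Int) (out : Int) : Decidable (Spec_solution k m score out) := by unfold Spec_solution; infer_instance

-- ===== CLAIM (what is proved, stated in full; the proofs are below) =====
def Claim_equal_solution : Prop := ∀ (k : Int) (m : Int) (score : List Int), Dom_solution k m score → Pre_solution k m score → Spec_solution k m score (solution k m score)

-- ===== LEMMAS AND PROOFS =====

-- proof-side abbreviations: the run-length expansion of the distinct values and its prefix sums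
def pvExp (score vals : List Int) : List Int :=
  vals.flatMap (fun v => List.replicate (score.count v) v)
def pvPref (score vals : List Int) (vi : Nat) : Nat :=
  ((vals.take vi).map (fun v => score.count v)).sum

-- range(a, b, m) for a positive step m: nil and cons forms (derived from PySem.List.pyRange_of_pos).
theorem pyRangePos_nil (a b m : Int) (hm : 0 < m) (h : b ≤ a) :
    PySem.List.pyRange a b m = [] := by
  rw [PySem.List.pyRange_of_pos a b hm, if_neg (not_lt.mpr h)]
  simp

theorem pyRangePos_cons (a b m : Int) (hm : 0 < m) (h : a < b) :
    PySem.List.pyRange a b m = a :: PySem.List.pyRange (a + m) b m := by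
  rw [PySem.List.pyRange_of_pos a b hm, PySem.List.pyRange_of_pos (a + m) b hm]
  have hdiv : (b - a + m - 1) / m = (b - a - 1) / m + 1 := by
    have h1 := Int.add_mul_ediv_right (b - a - 1) 1 (show m ≠ 0 by omega)
    have he : b - a + m - 1 = b - a - 1 + 1 * m := by ring
    rw [he, h1]
  have hq : (if a < b then ((b - a + m - 1) / m).toNat else 0)
      = (if a + m < b then ((b - (a + m) + m - 1) / m).toNat else 0) + 1 := by
    rw [if_pos h]
    by_cases h2 : a + m < b
    · rw [if_pos h2]
      have hnn : 0 ≤ (b - a - 1) / m := Int.ediv_nonneg (by omega) (by omega)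
      have he : b - (a + m) + m - 1 = b - a - 1 := by ring_nf
      rw [he, hdiv]; omega
    · rw [if_neg h2]
      have hz : (b - a - 1) / m = 0 := Int.ediv_eq_zero_of_lt (by omega) (by omega)
      rw [hdiv, hz]; decide
  rw [hq, List.range_succ_eq_map]
  simp only [List.map_cons, List.map_map, Nat.cast_zero, mul_zero, add_zero]
  congr 1
  apply List.map_congr_left
  intro x _
  simp only [Function.comp_apply]
  push_cast; ring

theorem pyRangeNeg_nil (a b m : Int) (hm : m < 0) (h : a ≤ b) :
    PySem.List.pyRange a b m = [] := by
  rw [PySem.List.pyRange_of_neg a b hm, if_neg (not_lt.mpr h)]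
  simp

-- min() of a nonempty descending list is its last element.
theorem min_desc (l : List Int) (hne : l ≠ []) (hp : l.Pairwise (fun a b => b ≤ a)) :
    PySem.List.min? l (fun x => x) = some (l.getLast hne) := by
  cases h : PySem.List.min? l (fun x => x) with
  | none => exact absurd ((PySem.List.min?_eq_none_iff l _).mp h) hne
  | some v =>
    have hvm := PySem.List.min?_mem h
    have hmin := PySem.List.min?_isMin h
    have hlast : ∀ y ∈ l, l.getLast hne ≤ y := by
      intro y hy
      obtain ⟨i, hi, rfl⟩ := List.mem_iff_getElem.mp hy
      rw [List.getLast_eq_getElem]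
      rcases Nat.lt_or_ge i (l.length - 1) with hlt | hge
      · exact List.pairwise_iff_getElem.mp hp i (l.length - 1) hi (by omega) hlt
      · have : i = l.length - 1 := by omega
        subst this; exact le_refl _
    have : v = l.getLast hne := le_antisymm (hmin _ (List.getLast_mem hne)) (hlast v hvm)
    rw [this]

-- min(score[i:i+m]) on the descending-sorted list is score[i+m-1].
theorem boxMin (s : List Int) (hp : s.Pairwise (fun a b => b ≤ a)) (m a : Int)
    (hm : 0 < m) (ha : 0 ≤ a) (hab : a + m ≤ (s.length : Int)) :
    (PySem.List.min? (PySem.List.slice s (some a) (some (a + m))) (fun x => x)).getD 0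
      = PySem.List.pyGetD s (a + m - 1) 0 := by
  rw [PySem.List.slice_toNat s ha (by omega)]
  have hsub : (a + m).toNat - a.toNat = m.toNat := by omega
  rw [hsub]
  set l := (s.drop a.toNat).take m.toNat with hl
  have hlen : l.length = m.toNat := by
    rw [hl]; simp only [List.length_take, List.length_drop]
    omega
  have hne : l ≠ [] := by
    intro hnil; rw [hnil] at hlen; simp at hlen; omega
  have hsl : l.Sublist s := ((s.drop a.toNat).take_sublist m.toNat).trans (s.drop_sublist a.toNat)
  rw [min_desc l hne (hp.sublist hsl), Option.getD_some]
  have hidx : l.length - 1 < l.length := by omega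
  have hg : l.getLast hne = l.getD (l.length - 1) 0 := by
    rw [List.getLast_eq_getElem, List.getD_eq_getElem l 0 hidx]
  rw [hg, hlen, hl, PySem.List.pyGetD_of_nonneg s 0 (by omega)]
  rw [List.getD_eq_getElem?_getD, List.getD_eq_getElem?_getD]
  rw [List.getElem?_take, if_pos (by omega : m.toNat - 1 < m.toNat), List.getElem?_drop]
  congr 2
  omega

-- A's loop: for a descending list s and positive step m, A's fold from index a equals acc plus
-- m times the sum of s at the box-boundary indices a+m-1, a+2m-1, ….
theorem box_fold (s : List Int) (hp : s.Pairwise (fun a b => b ≤ a)) (m : Int) (hm : 0 < m) :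
    ∀ (c : Nat) (a : Int), 0 ≤ a → ((s.length : Int) - a).toNat ≤ c → ∀ acc : Int,
    (PySem.List.pyRange a (s.length : Int) m).foldl
      (fun price i =>
        if i + m ≤ (s.length : Int) then
          price + ((PySem.List.min? (PySem.List.slice s (some i) (some (i + m))) (fun x => x)).getD 0) * m
        else price) acc
    = acc + ((PySem.List.pyRange (a + m - 1) (s.length : Int) m).map
        (fun i => PySem.List.pyGetD s i 0)).sum * m := by
  intro c
  induction c with
  | zero =>
    intro a ha hc acc
    have hge : (s.length : Int) ≤ a := by omega
    rw [pyRangePos_nil _ _ _ hm hge, pyRangePos_nil _ _ _ hm (by omega)]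
    simp
  | succ c ih =>
    intro a ha hc acc
    by_cases hlt : a < (s.length : Int)
    · rw [pyRangePos_cons _ _ _ hm hlt]
      simp only [List.foldl_cons]
      have hcnt : ((s.length : Int) - (a + m)).toNat ≤ c := by omega
      by_cases hfull : a + m ≤ (s.length : Int)
      · rw [if_pos hfull]
        rw [ih (a + m) (by omega) hcnt]
        rw [boxMin s hp m a hm ha hfull]
        rw [pyRangePos_cons (a + m - 1) ((s.length : Int)) m hm (by omega)]
        simp only [List.map_cons, List.sum_cons]
        have h3 : a + m + m - 1 = a + m - 1 + m := by ring
        rw [h3]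
        ring
      · rw [if_neg hfull]
        rw [ih (a + m) (by omega) hcnt]
        rw [pyRangePos_nil (a + m + m - 1) ((s.length : Int)) m hm (by omega),
            pyRangePos_nil (a + m - 1) ((s.length : Int)) m hm (by omega)]
    · rw [pyRangePos_nil _ _ _ hm (by omega), pyRangePos_nil _ _ _ hm (by omega)]
      simp

-- prefix sums of the run counts: step and basic facts
theorem pvPref_zero (score vals : List Int) : pvPref score vals 0 = 0 := rfl


theorem pvPref_succ (score vals : List Int) (vi : Nat) (h : vi < vals.length) :
    pvPref score vals (vi + 1) = pvPref score vals vi + score.count vals[vi] := by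
  unfold pvPref
  rw [List.map_take, List.map_take, List.sum_take_succ _ vi (by simpa using h)]
  simp

theorem pvPref_mono (score vals : List Int) (i j : Nat) (hij : i ≤ j) :
    pvPref score vals i ≤ pvPref score vals j := by
  unfold pvPref
  have h1 : vals.take i = (vals.take j).take i := by rw [List.take_take, min_eq_left hij]
  rw [h1, List.map_take, List.map_take]
  exact ((vals.map (fun v => score.count v)).take j).take_sublist i |>.sum_le_sum (by intro x hx; exact Nat.zero_le x)

theorem pvPref_length (score vals : List Int) :
    pvPref score vals vals.length = (pvExp score vals).length := by
  unfold pvPref pvExp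
  rw [List.take_length, List.length_flatMap]
  simp

-- the value at rank j of the expansion is the value of the run containing j

theorem pvExp_getD (score : List Int) :
    ∀ (vals : List Int) (vi : Nat) (h : vi < vals.length) (j : Nat),
      pvPref score vals vi ≤ j → j < pvPref score vals (vi + 1) →
      (pvExp score vals).getD j 0 = vals[vi] := by
  intro vals
  induction vals with
  | nil => intro vi h; simp at h
  | cons v t ih =>
    intro vi h j hlo hhi
    cases vi with
    | zero =>
      have hhi' : j < score.count v := by
        have := hhi; unfold pvPref at this; simpa [List.take_add_one] using this
      unfold pvExp
      rw [List.flatMap_cons, List.getD_eq_getElem?_getD, List.getElem?_append_left (by simpa using hhi')]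
      simp [hhi']
    | succ vi =>
      have e1 : pvPref score (v :: t) (vi + 1) = score.count v + pvPref score t vi := by
        simp [pvPref, List.take_succ_cons]
      have e2 : pvPref score (v :: t) (vi + 1 + 1) = score.count v + pvPref score t (vi + 1) := by
        simp [pvPref, List.take_succ_cons]
      rw [e1] at hlo
      rw [e2] at hhi
      have hlo' := hlo
      have hhi' := hhi
      have hrec := ih vi (by simpa using h) (j - score.count v) (by omega) (by omega)
      unfold pvExp at hrec ⊢
      rw [List.flatMap_cons, List.getD_eq_getElem?_getD,
          List.getElem?_append_right (by simpa using (by omega : score.count v ≤ j))]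
      simp only [List.length_replicate]
      rw [← List.getD_eq_getElem?_getD]
      simpa using hrec

-- counting: the expansion over nodup values has the same counts as score

theorem pvExp_count (score : List Int) :
    ∀ (vals : List Int), vals.Nodup → ∀ x, (pvExp score vals).count x =
      if x ∈ vals then score.count x else 0 := by
  intro vals
  induction vals with
  | nil => intro _ x; simp [pvExp]
  | cons v t ih =>
    intro hnd x
    have hvt : v ∉ t := (List.nodup_cons.mp hnd).1
    have hrec := ih (List.nodup_cons.mp hnd).2 x
    unfold pvExp at hrec ⊢
    rw [List.flatMap_cons, List.count_append, List.count_replicate, hrec]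
    by_cases hx : x = v
    · subst hx
      simp [hvt]
    · simp [hx, List.mem_cons, Ne.symm hx]

theorem pvExp_perm (score vals : List Int) (hnd : vals.Nodup)
    (hmem : ∀ x, x ∈ vals ↔ x ∈ score) : (pvExp score vals).Perm score := by
  rw [List.perm_iff_count]
  intro x
  rw [pvExp_count score vals hnd x]
  by_cases hx : x ∈ vals
  · simp [hx]
  · have : x ∉ score := fun h => hx ((hmem x).mpr h)
    simp [hx, List.count_eq_zero_of_not_mem this]

theorem pvExp_pairwise (score : List Int) :
    ∀ (vals : List Int), vals.Pairwise (fun a b => b < a) →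
      (pvExp score vals).Pairwise (fun a b => b ≤ a) := by
  intro vals
  induction vals with
  | nil => intro _; simp [pvExp]
  | cons v t ih =>
    intro hp
    rw [List.pairwise_cons] at hp
    unfold pvExp
    rw [List.flatMap_cons, List.pairwise_append]
    refine ⟨List.pairwise_replicate.mpr (Or.inr (le_refl v)), ih hp.2, ?_⟩
    intro x hx y hy
    have hxv : x = v := List.eq_of_mem_replicate hx
    obtain ⟨w, hw, hyw⟩ := List.mem_flatMap.mp hy
    have : y = w := List.eq_of_mem_replicate hyw
    subst hxv
    rw [this]
    exact le_of_lt (hp.1 w hw)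

-- the descending sort of score IS the run-length expansion of its descending distinct values

theorem sorted_eq_pvExp (score : List Int) :
    PySem.List.sorted score (fun x => x) true
      = pvExp score (PySem.List.sorted (PySem.Set.ofList score) (fun x => x) true) := by
  set vals := PySem.List.sorted (PySem.Set.ofList score) (fun x => x) true with hv
  have hperm : vals.Perm (PySem.Set.ofList score) := PySem.List.sorted_perm _ _ _
  have hnd : vals.Nodup := hperm.symm.nodup (PySem.Set.nodup_ofList score)
  have hge : vals.Pairwise (fun a b => b ≤ a) := PySem.List.sorted_pairwise_rev _ _
  have hlt : vals.Pairwise (fun a b => b < a) :=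
    (hge.and hnd).imp (fun h => lt_of_le_of_ne h.1 (Ne.symm h.2))
  have hmem : ∀ x, x ∈ vals ↔ x ∈ score := by
    intro x
    rw [PySem.List.mem_sorted, PySem.Set.mem_ofList]
  have hEperm : (pvExp score vals).Perm score := pvExp_perm score vals hnd hmem
  have hs : (PySem.List.sorted score (fun x => x) true).Perm (pvExp score vals) :=
    (PySem.List.sorted_perm _ _ _).trans hEperm.symm
  apply PySem.List.eq_of_perm_of_pairwise_le_of_injective (fun x : Int => -x) neg_injective hs
  · exact (PySem.List.sorted_pairwise_rev _ _).imp (fun h => neg_le_neg h)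
  · exact (pvExp_pairwise score vals hlt).imp (fun h => neg_le_neg h)

-- the inner while loop: starting at a prefix-sum state, it stops at the run containing b

theorem pvAdvance_spec (score vals : List Int) (b : Int) :
    ∀ (c : Nat) (vi : Nat), vals.length - vi ≤ c →
      (pvPref score vals vi : Int) ≤ b →
      b < (pvPref score vals vals.length : Int) →
      ∃ vi', vi ≤ vi' ∧ vi' < vals.length ∧
        pvAdvance vals (PySem.Dict.counter score) b ((pvPref score vals vi : Nat) : Int) vi
          = (((pvPref score vals vi' : Nat) : Int), vi') ∧
        (pvPref score vals vi' : Int) ≤ b ∧ b < (pvPref score vals (vi' + 1) : Int) := by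
  intro c
  induction c with
  | zero =>
    intro vi hc hlo hhi
    have hvi : vals.length ≤ vi := by omega
    have := pvPref_mono score vals vals.length vi hvi
    omega
  | succ c ih =>
    intro vi hc hlo hhi
    have hvi : vi < vals.length := by
      by_contra hge
      have := pvPref_mono score vals vals.length vi (by omega)
      omega
    have hget : PySem.List.pyGetD vals (vi : Int) 0 = vals[vi] := by
      rw [PySem.List.pyGetD_natCast]
      exact List.getD_eq_getElem vals 0 hvi
    have hcnt : (PySem.Dict.counter score).getD vals[vi] 0 = (score.count vals[vi] : Int) := by
      rw [PySem.Dict.getD_counter]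
    rw [pvAdvance, dif_pos hvi, hget, hcnt]
    have hstep : ((pvPref score vals vi : Nat) : Int) + (score.count vals[vi] : Int)
        = ((pvPref score vals (vi + 1) : Nat) : Int) := by
      rw [pvPref_succ score vals vi hvi]; push_cast; ring
    by_cases hle : ((pvPref score vals vi : Nat) : Int) + (score.count vals[vi] : Int) ≤ b
    · rw [if_pos hle, hstep]
      obtain ⟨vi', h1, h2, h3, h4, h5⟩ := ih (vi + 1) (by omega) (by omega) hhi
      exact ⟨vi', by omega, h2, h3, h4, h5⟩
    · rw [if_neg hle]
      exact ⟨vi, le_refl vi, hvi, rfl, hlo, by omega⟩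

-- B's outer loop: the pointer walk sums the descending-sorted list at the boundary indices

theorem ptr_fold (score vals : List Int) (m : Int) (hm : 0 < m)
    (hE : PySem.List.sorted score (fun x => x) true = pvExp score vals) :
    ∀ (c : Nat) (a : Int) (vi : Nat) (total : Int),
      vi ≤ vals.length → (pvPref score vals vi : Int) ≤ a →
      ((score.length : Int) - a).toNat ≤ c →
      ((PySem.List.pyRange a (score.length : Int) m).foldl
        (fun (st : Int × Int × Nat) b =>
          let p := pvAdvance vals (PySem.Dict.counter score) b st.2.1 st.2.2
          (st.1 + PySem.List.pyGetD vals (p.2 : Int) 0, p.1, p.2))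
        (total, ((pvPref score vals vi : Nat) : Int), vi)).1
      = total + ((PySem.List.pyRange a (score.length : Int) m).map
          (fun b => PySem.List.pyGetD (PySem.List.sorted score (fun x => x) true) b 0)).sum := by
  have hN : ((pvPref score vals vals.length : Nat) : Int) = (score.length : Int) := by
    rw [pvPref_length, ← hE, PySem.List.length_sorted]
  intro c
  induction c with
  | zero =>
    intro a vi total _ _ hc
    rw [pyRangePos_nil _ _ _ hm (by omega)]
    simp
  | succ c ih =>
    intro a vi total hvi hlo hc
    by_cases hlt : a < (score.length : Int)
    · rw [pyRangePos_cons _ _ _ hm hlt]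
      simp only [List.foldl_cons, List.map_cons, List.sum_cons]
      obtain ⟨vi', h1, h2, h3, h4, h5⟩ :=
        pvAdvance_spec score vals a (vals.length - vi) vi (le_refl _) hlo (by omega)
      simp only [h3]
      have hpre0 : (0 : Int) ≤ (pvPref score vals vi' : Int) := by positivity
      have hval : PySem.List.pyGetD vals ((vi' : Nat) : Int) 0
          = PySem.List.pyGetD (PySem.List.sorted score (fun x => x) true) a 0 := by
        rw [PySem.List.pyGetD_natCast, List.getD_eq_getElem vals 0 h2]
        rw [PySem.List.pyGetD_of_nonneg _ 0 (by omega), hE]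
        exact (pvExp_getD score vals vi' h2 a.toNat (by omega) (by omega)).symm
      rw [hval]
      rw [ih (a + m) vi' (total + PySem.List.pyGetD (PySem.List.sorted score (fun x => x) true) a 0) (by omega) (by omega) (by omega)]
      ring
    · rw [pyRangePos_nil _ _ _ hm (by omega)]
      simp

-- ===== VERDICT (by name: the statement is the Claim_ definition above) =====
theorem solution_spec : Claim_equal_solution := by
  intro k m score _ hpre
  unfold Spec_solution solution solution_alt
  simp only []
  rw [PySem.Dict.foldl_insert_getD_add_one_eq_counter, PySem.Dict.keys_counter]
  set s := PySem.List.sorted score (fun x => x) true with hs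
  set vals := PySem.List.sorted (PySem.Set.ofList score) (fun x => x) true with hvals
  have hlen : s.length = score.length := PySem.List.length_sorted _ _ _
  rcases lt_or_gt_of_ne hpre with hneg | hpos
  · rw [pyRangeNeg_nil 0 _ m hneg (by positivity),
        pyRangeNeg_nil (m - 1) _ m hneg (by omega)]
    simp
  · have hp : s.Pairwise (fun a b => b ≤ a) := PySem.List.sorted_pairwise_rev score (fun x => x)
    rw [box_fold s hp m hpos ((s.length : Int) - 0).toNat 0 le_rfl le_rfl 0]
    have hE : s = pvExp score vals := sorted_eq_pvExp score
    have hfold := ptr_fold score vals m hpos hE ((score.length : Int) - (m - 1)).toNat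
      (m - 1) 0 0 (Nat.zero_le _) (by simp [pvPref_zero]; omega) le_rfl
    simp only [pvPref_zero, Nat.cast_zero] at hfold
    have h01 : (0 : Int) + m - 1 = m - 1 := by ring
    rw [hfold, hlen, ← hs, h01]
    ring
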